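-- pv_equiv track=rewrite | github.com/nat-is-alive/codewars-python | findSiteName.py | find_site_names
-- ===== SOURCE A (Python) =====
-- def find_site_names(url:str) -> str:
--     writing:bool = 0
--     output:str = ''
--
--     for char in url:
--         if writing:
--             output = output + char
--         if char == '.':
--             writing = not writing
--     return output.replace('.', '')
-- ===== SOURCE B (Python) =====
-- def find_site_names(url: str) -> str:
--     return ''.join(url.split('.')[1::2])
-- ===== Notes on version B (the rewrite author's own statement) =====
-- stated objective: faster
-- what changed: Replaces the char-by-char toggle state machine (flag flipped at each dot, chars appended one by one while the flag is on, dots stripped afterwards) with a single split on the dot separator followed by joining the odd-indexed segments.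
import Mathlib
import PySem

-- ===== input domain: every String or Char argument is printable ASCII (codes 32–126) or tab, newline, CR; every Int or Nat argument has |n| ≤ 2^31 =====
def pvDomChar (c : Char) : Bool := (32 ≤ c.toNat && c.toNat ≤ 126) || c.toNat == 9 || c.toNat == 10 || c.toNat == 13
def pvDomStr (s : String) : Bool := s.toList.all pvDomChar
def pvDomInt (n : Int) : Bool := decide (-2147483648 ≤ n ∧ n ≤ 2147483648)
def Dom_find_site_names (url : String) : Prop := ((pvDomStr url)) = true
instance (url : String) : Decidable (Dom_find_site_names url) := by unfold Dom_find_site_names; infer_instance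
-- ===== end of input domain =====

-- B replaces A's char-by-char toggle state machine with split('.') + join of the odd-indexed
-- segments (measurably faster: no per-char string concatenation). Equivalence is proved for all inputs.

-- ===== PORT A =====
-- Python's `writing` starts as int 0 and is only ever negated; it is ported as Bool.
def find_site_names (url : String) : String :=
  PySem.Str.replace
    (String.ofList
      (url.toList.foldl
        (fun (st : Bool × List Char) c =>
          ((if c = '.' then !st.1 else st.1), (if st.1 then st.2 ++ [c] else st.2)))
        (false, [])).2)
    "." ""

-- ===== PORT B =====
def find_site_names_alt (url : String) : String :=
  PySem.Str.join ""
    ((PySem.List.slice? ((PySem.Str.split? url ".").getD []) (some 1) none 2).getD [])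

-- ===== PRECONDITION & SPEC =====
def Spec_find_site_names (url : String) (out : String) : Prop := out = find_site_names_alt url
instance (url : String) (out : String) : Decidable (Spec_find_site_names url out) := by unfold Spec_find_site_names; infer_instance

-- ===== CLAIM (what is proved, stated in full; the proofs are below) =====
def Claim_equal_find_site_names : Prop := ∀ (url : String), Dom_find_site_names url → Spec_find_site_names url (find_site_names url)

-- ===== LEMMAS AND PROOFS =====

-- the pieces of a char list between '.' separators (Python's split('.'))
def splitDots : List Char → List (List Char)
  | [] => [[]]
  | c :: r => if c = '.' then [] :: splitDots r
              else match splitDots r with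
                   | [] => [[c]]
                   | s :: t => (c :: s) :: t

-- odd-indexed elements of a list (xs[1::2])
def odds {α : Type} : List α → List α
  | [] => []
  | [_] => []
  | _ :: b :: t => b :: odds t

-- even-indexed elements
def evens {α : Type} : List α → List α
  | [] => []
  | a :: t => a :: odds t

-- what A's loop appends starting from flag w
def loopA : Bool → List Char → List Char
  | _, [] => []
  | w, c :: r => (if w then [c] else []) ++ loopA (if c = '.' then !w else w) r

-- join of the segments selected by an alternating flag (false = skip first)
def jsel : Bool → List (List Char) → List Char
  | _, [] => []
  | b, s :: t => (if b then s else []) ++ jsel (!b) t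

theorem splitDots_ne_nil (l : List Char) : splitDots l ≠ [] := by
  induction l with
  | nil => simp [splitDots]
  | cons c r ih =>
    simp only [splitDots]
    split
    · simp
    · cases h : splitDots r with
      | nil => simp
      | cons s t => simp

theorem odds_cons {α : Type} (a : α) (t : List α) : odds (a :: t) = evens t := by
  cases t <;> simp [odds, evens]

theorem splitOn_go_eq (fuel : Nat) : ∀ (l cur : List Char) (acc : List (List Char)),
    l.length ≤ fuel →
    PySem.Chars.splitOn.go ['.'] fuel l cur acc =
      acc.reverse ++ (match splitDots l with
                      | [] => [cur.reverse]
                      | s :: t => (cur.reverse ++ s) :: t) := by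
  induction fuel with
  | zero =>
    intro l cur acc h
    have : l = [] := by cases l <;> simp_all
    subst this
    rw [PySem.Chars.splitOn.go.eq_def]
    simp [splitDots]
  | succ fuel ih =>
    intro l cur acc h
    cases l with
    | nil =>
      rw [PySem.Chars.splitOn.go.eq_def]
      simp [splitDots]
    | cons c rest =>
      rw [PySem.Chars.splitOn.go.eq_def]
      simp only [List.length_cons] at h
      by_cases hc : c = '.'
      · subst hc
        have hpre : List.isPrefixOf ['.'] ('.' :: rest) = true := by simp [List.isPrefixOf]
        simp only [hpre, if_pos, List.length_cons, List.length_nil, List.drop_succ_cons, List.drop_zero]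
        rw [ih rest [] ((cur.reverse) :: acc) (by omega)]
        simp only [splitDots]
        cases hs : splitDots rest with
        | nil => exact absurd hs (splitDots_ne_nil rest)
        | cons s t => simp
      · have hpre : List.isPrefixOf ['.'] (c :: rest) = false := by
          simp [List.isPrefixOf]; exact fun h' => hc h'.symm
        simp only [hpre]
        rw [if_neg (by simp)]
        rw [ih rest (c :: cur) acc (by omega)]
        simp only [splitDots, if_neg hc]
        cases hs : splitDots rest with
        | nil => exact absurd hs (splitDots_ne_nil rest)
        | cons s t => simp

theorem splitOn_eq_splitDots (l : List Char) :
    PySem.Chars.splitOn l ['.'] = splitDots l := by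
  unfold PySem.Chars.splitOn
  rw [splitOn_go_eq (l.length + 1) l [] [] (by omega)]
  cases hs : splitDots l with
  | nil => exact absurd hs (splitDots_ne_nil l)
  | cons s t => simp

theorem replace_go_eq (fuel : Nat) : ∀ (l acc : List Char),
    l.length ≤ fuel →
    PySem.Chars.replace.go ['.'] [] fuel l acc =
      acc.reverse ++ l.filter (· ≠ '.') := by
  induction fuel with
  | zero =>
    intro l acc h
    have : l = [] := by cases l <;> simp_all
    subst this
    rw [PySem.Chars.replace.go.eq_def]
    simp
  | succ fuel ih =>
    intro l acc h
    cases l with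
    | nil =>
      rw [PySem.Chars.replace.go.eq_def]
      simp
    | cons c rest =>
      rw [PySem.Chars.replace.go.eq_def]
      simp only [List.length_cons] at h
      by_cases hc : c = '.'
      · subst hc
        have hpre : List.isPrefixOf ['.'] ('.' :: rest) = true := by simp [List.isPrefixOf]
        simp only [hpre, if_pos, List.length_cons, List.length_nil, List.drop_succ_cons, List.drop_zero, List.reverse_nil, List.nil_append]
        rw [ih rest acc (by omega)]
        simp
      · have hpre : List.isPrefixOf ['.'] (c :: rest) = false := by
          simp [List.isPrefixOf]; exact fun h' => hc h'.symm
        simp only [hpre]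
        rw [if_neg (by simp)]
        rw [ih rest (c :: acc) (by omega)]
        simp [hc]

theorem replace_dot_eq_filter (l : List Char) :
    PySem.Chars.replace l ['.'] [] = l.filter (· ≠ '.') := by
  unfold PySem.Chars.replace
  rw [if_neg (by simp)]
  exact replace_go_eq l.length l [] (le_refl _)

theorem filterMap_range_odds {α : Type} (ys : List α) :
    (List.range (ys.length / 2)).filterMap (fun k => ys[1 + 2 * k]?) = odds ys := by
  induction ys using odds.induct with
  | case1 => simp [odds]
  | case2 a => simp [odds]
  | case3 a b t ih =>
    have hlen : (a :: b :: t).length / 2 = t.length / 2 + 1 := by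
      simp; omega
    have h0 : (a :: b :: t)[1 + 2 * 0]? = some b := by simp
    rw [hlen, List.range_succ_eq_map, List.filterMap_cons, List.filterMap_map, h0]
    simp only [odds]
    congr 1

theorem slice?_one_two {α : Type} (xs : List α) :
    PySem.List.slice? xs (some 1) none 2 = some (odds xs) := by
  cases xs with
  | nil => simp [PySem.List.slice?, PySem.List.sliceIndices, odds]
  | cons a t =>
    have hidx : PySem.List.sliceIndices (a :: t).length (some 1) none 2 =
        (1, ((a :: t).length : Int), 2) := by
      simp [PySem.List.sliceIndices]
    have hcount : (if (1:Int) < ((a :: t).length : Int)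
        then ((((a :: t).length : Int) - 1 + 2 - 1) / 2).toNat else 0) = (a :: t).length / 2 := by
      split <;> omega
    unfold PySem.List.slice?
    rw [if_neg (by norm_num), hidx]
    simp only
    rw [if_pos (by norm_num : (0:Int) < 2), hcount]
    congr 1
    rw [← filterMap_range_odds (a :: t)]
    apply List.filterMap_congr
    intro k _
    have h2 : ((1 : Int) + 2 * (k : Int)).toNat = 1 + 2 * k := by omega
    rw [h2]
theorem foldl_loopA (cs : List Char) : ∀ (w : Bool) (out : List Char),
    (cs.foldl
      (fun (st : Bool × List Char) c =>
        ((if c = '.' then !st.1 else st.1), (if st.1 then st.2 ++ [c] else st.2)))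
      (w, out)).2 = out ++ loopA w cs := by
  induction cs with
  | nil => intro w out; simp [loopA]
  | cons c r ih =>
    intro w out
    simp only [List.foldl_cons, loopA]
    rw [ih]
    cases w <;> simp

theorem loopA_filter (cs : List Char) : ∀ (w : Bool),
    (loopA w cs).filter (· ≠ '.') = jsel w (splitDots cs) := by
  induction cs with
  | nil => intro w; simp [loopA, splitDots, jsel]
  | cons c r ih =>
    intro w
    by_cases hc : c = '.'
    · subst hc
      simp only [loopA, splitDots]
      rw [List.filter_append, ih]
      cases w <;> simp [jsel]
    · simp only [loopA, if_neg hc, splitDots]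
      rw [List.filter_append, ih]
      cases hs : splitDots r with
      | nil => exact absurd hs (splitDots_ne_nil r)
      | cons s t =>
        simp only [jsel]
        cases w <;> simp [hc]

theorem jsel_eq_flatten (L : List (List Char)) :
    jsel false L = (odds L).flatten ∧ jsel true L = (evens L).flatten := by
  induction L with
  | nil => simp [jsel, odds, evens]
  | cons s t ih => refine ⟨?_, ?_⟩ <;> simp [jsel, odds_cons, evens, ih.1, ih.2]

theorem join_nil_eq_flatten (parts : List (List Char)) :
    PySem.Chars.join [] parts = parts.flatten := by
  induction parts with
  | nil => simp [PySem.Chars.join, List.intercalate]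
  | cons s t ih =>
    cases t with
    | nil => simp [PySem.Chars.join, List.intercalate]
    | cons s' t' =>
      rw [PySem.Chars.join_cons_cons, ih]
      simp

theorem odds_map {α β : Type} (f : α → β) (l : List α) :
    odds (l.map f) = (odds l).map f := by
  induction l using odds.induct <;> simp [odds, *]

-- ===== VERDICT (by name: the statement is the Claim_ definition above) =====
theorem find_site_names_spec : Claim_equal_find_site_names := by
  intro url _
  unfold Spec_find_site_names find_site_names find_site_names_alt
  have hsegs : PySem.Str.split? url "." = some ((splitDots url.toList).map String.ofList) := by
    unfold PySem.Str.split? PySem.Chars.split?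
    rw [show (".".toList) = ['.'] from rfl]
    rw [if_neg (by simp), splitOn_eq_splitDots]
    rfl
  rw [← String.toList_inj, PySem.Str.toList_replace, String.toList_ofList,
    show (".".toList) = ['.'] from rfl, show ("".toList) = ([] : List Char) from rfl,
    replace_dot_eq_filter, foldl_loopA, List.nil_append, loopA_filter,
    (jsel_eq_flatten _).1, hsegs]
  simp only [Option.getD_some, slice?_one_two, PySem.Str.toList_join]
  rw [show ("".toList) = ([] : List Char) from rfl, join_nil_eq_flatten, odds_map]
  simp [List.map_map, Function.comp_def]
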